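-- pv_equiv track=rewrite | github.com/eliottcassidy2000/math | 04-computation/q009_n8_residual.py | count_cycles_using_arc_by_length
-- ===== SOURCE A (Python) =====
-- from itertools import combinations, permutations
--
-- def count_cycles_using_arc_by_length(T, n, i, j, min_length=5):
--     others = [u for u in range(n) if u != i and u != j]
--     counts = {}
--     for L in range(min_length, n + 1, 2):
--         extra_needed = L - 2
--         if extra_needed > len(others):
--             break
--         count = 0
--         for extra in combinations(others, extra_needed):
--             verts = list(extra)
--             nv = len(verts)
--             dp = [[0] * nv for _ in range(1 << nv)]
--             for k in range(nv):
--                 if T[j][verts[k]]: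
--                     dp[1 << k][k] = 1
--             full = (1 << nv) - 1
--             for mask in range(1, 1 << nv):
--                 for v in range(nv):
--                     if not (mask & (1 << v)) or dp[mask][v] == 0:
--                         continue
--                     for u in range(nv):
--                         if mask & (1 << u):
--                             continue
--                         if T[verts[v]][verts[u]]:
--                             dp[mask | (1 << u)][u] += dp[mask][v]
--             for v in range(nv):
--                 if dp[full][v] > 0 and T[verts[v]][i]:
--                     count += dp[full][v]
--         counts[L] = count
--     return counts
-- ===== SOURCE B (Python) =====
-- from itertools import combinations
--
-- def count_cycles_using_arc_by_length(T, n, i, j, min_length=5):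
--     # ONE shared layered pull-DP over subsets of the candidate vertices (layer s-1 feeds
--     # layer s), aggregated per subset size, instead of A's separate push-DP re-run for
--     # every combination.
--     others = [u for u in range(n) if u != i and u != j]
--     m = len(others)
--     Ls = []
--     for L in range(min_length, n + 1, 2):
--         if L - 2 > m:
--             break
--         Ls.append(L)
--     kmax = 0
--     for L in Ls:
--         kmax = max(kmax, L - 2)
--     by_size = [0] * (m + 1)
--     prev = {}
--     for s in range(1, kmax + 1):
--         cur = {}
--         for comb in combinations(range(m), s):
--             mask = 0
--             for t in comb:
--                 mask |= 1 << t
--             for v in comb: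
--                 rest = mask ^ (1 << v)
--                 if rest == 0:
--                     val = 1 if T[j][others[v]] else 0
--                 else:
--                     val = 0
--                     for u in range(m):
--                         if (rest >> u) & 1 and T[others[u]][others[v]]:
--                             val += prev.get((rest, u), 0)
--                 cur[(mask, v)] = val
--                 if val and T[others[v]][i]:
--                     by_size[s] += val
--         prev = cur
--     counts = {}
--     for L in Ls:
--         counts[L] = by_size[L - 2] if L > 2 else 0
--     return counts
-- ===== Notes on version B (the rewrite author's own statement) =====
-- stated objective: alternative
-- what changed: A re-runs a fresh per-combination Hamiltonian-path push-DP for every subset of L-2 intermediate vertices; B runs one shared layered pull-DP over subsets (each size-s layer computed once from the size-(s-1) layer) and aggregates completed path counts per subset size, so each L just reads an aggregate.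
-- outside the precondition, e.g. on count_cycles_using_arc_by_length([[1, 1], [1, 1]], 2, -1, 0, 2): A returns {2: 0}, B returns {2: 0}; on count_cycles_using_arc_by_length([[1, 1, 1], [1, 1, 1], [1, 1, 1]], 2, 2, 0, 2): A returns {2: 0}, B returns {2: 0}
import Mathlib
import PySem

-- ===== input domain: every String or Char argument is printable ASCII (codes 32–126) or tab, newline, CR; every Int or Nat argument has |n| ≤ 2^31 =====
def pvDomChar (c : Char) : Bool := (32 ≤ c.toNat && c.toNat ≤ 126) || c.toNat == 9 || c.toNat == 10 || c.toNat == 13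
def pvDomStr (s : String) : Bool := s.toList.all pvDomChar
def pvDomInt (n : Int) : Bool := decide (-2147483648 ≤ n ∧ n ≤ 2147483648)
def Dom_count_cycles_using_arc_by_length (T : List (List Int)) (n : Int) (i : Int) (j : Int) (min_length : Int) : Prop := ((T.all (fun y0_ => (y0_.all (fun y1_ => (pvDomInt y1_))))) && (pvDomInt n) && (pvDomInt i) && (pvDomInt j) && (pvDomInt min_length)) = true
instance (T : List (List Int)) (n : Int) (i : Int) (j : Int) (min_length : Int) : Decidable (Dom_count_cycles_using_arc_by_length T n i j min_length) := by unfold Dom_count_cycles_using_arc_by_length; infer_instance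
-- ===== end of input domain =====

-- B replaces A's per-combination Hamiltonian-path push-DP (recomputed from scratch for every
-- subset) by one shared layered pull-DP over subsets, aggregated per subset size.

-- ===== PORT A =====
-- matrix entry T[a][b] (indices are in range under Pre_)
def pvEnt (T : List (List Int)) (a b : Nat) : Int := (T.getD a []).getD b 0

-- dp cell update (dp modelled as a function (mask, v) ↦ value)
def pvUpd (f : Nat → Nat → Int) (a b : Nat) (x : Int) : Nat → Nat → Int :=
  fun p q => if p = a ∧ q = b then x else f p q

-- the body of A's `for mask…: for v…: for u…` push loop, for one mask
def pvAInner (T : List (List Int)) (verts : List Nat) (mask : Nat) (f : Nat → Nat → Int) :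
    Nat → Nat → Int :=
  (List.range verts.length).foldl (fun g v =>
    if ¬ mask.testBit v ∨ g mask v = 0 then g
    else (List.range verts.length).foldl (fun h u =>
      if mask.testBit u then h
      else if pvEnt T (verts.getD v 0) (verts.getD u 0) ≠ 0 then
        pvUpd h (mask ||| 2 ^ u) u (h (mask ||| 2 ^ u) u + h mask v)
      else h) g) f

-- A's dp for one combination `verts`: init (paths j→verts[k]) then the mask loop
def pvADp (T : List (List Int)) (jN : Nat) (verts : List Nat) : Nat → Nat → Int :=
  (List.range' 1 (2 ^ verts.length - 1)).foldl (fun f mask => pvAInner T verts mask f)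
    ((List.range verts.length).foldl
      (fun f k => if pvEnt T jN (verts.getD k 0) ≠ 0 then pvUpd f (2 ^ k) k 1 else f)
      (fun _ _ => 0))

-- A's per-combination count: close the path back into i from dp[full]
def pvACount (T : List (List Int)) (iN jN : Nat) (verts : List Nat) : Int :=
  let f := pvADp T jN verts
  let full := 2 ^ verts.length - 1
  (List.range verts.length).foldl
    (fun c v => if f full v > 0 ∧ pvEnt T (verts.getD v 0) iN ≠ 0 then c + f full v else c) 0

-- A's L-loop with its `break`
def pvALoop (T : List (List Int)) (iN jN : Nat) (others : List Nat) : List Int → List (Int × Int)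
  | [] => []
  | L :: rest =>
    if L - 2 > (others.length : Int) then []
    else (L, (PySem.List.combinations others (L - 2).toNat).foldl
               (fun c extra => c + pvACount T iN jN extra) 0) :: pvALoop T iN jN others rest

def count_cycles_using_arc_by_length (T : List (List Int)) (n : Int) (i : Int) (j : Int) (min_length : Int) : List (Int × Int) :=
  let others : List Nat :=
    (List.range n.toNat).filter (fun u => decide ((u : Int) ≠ i) && decide ((u : Int) ≠ j))
  pvALoop T i.toNat j.toNat others (PySem.List.pyRange min_length (n + 1) 2)

-- ===== PORT B =====
-- B's pull value for cell (rest ∪ {v}, v), read from the previous layer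
def pvBVal (T : List (List Int)) (jN : Nat) (others : List Nat) (prev : Nat → Nat → Int)
    (rest v : Nat) : Int :=
  if rest = 0 then (if pvEnt T jN (others.getD v 0) ≠ 0 then 1 else 0)
  else (List.range others.length).foldl
    (fun val u => if rest.testBit u ∧ pvEnt T (others.getD u 0) (others.getD v 0) ≠ 0 then
        val + prev rest u else val) 0

-- B's per-vertex step inside one combination: fill cur[(mask,v)], aggregate into by_size
def pvBStepV (T : List (List Int)) (iN : Nat) (jN : Nat) (others : List Nat)
    (prev : Nat → Nat → Int) (mask s : Nat)
    (st : (Nat → Nat → Int) × (Nat → Int)) (v : Nat) : (Nat → Nat → Int) × (Nat → Int) :=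
  let val := pvBVal T jN others prev (mask ^^^ 2 ^ v) v
  let cur' := pvUpd st.1 mask v val
  if val ≠ 0 ∧ pvEnt T (others.getD v 0) iN ≠ 0 then
    (cur', fun z => if z = s then st.2 z + val else st.2 z)
  else (cur', st.2)

-- one size-s layer: loop over all combinations of that size
def pvBPass (T : List (List Int)) (iN jN : Nat) (others : List Nat) (s : Nat)
    (st : (Nat → Nat → Int) × (Nat → Int)) : (Nat → Nat → Int) × (Nat → Int) :=
  (PySem.List.combinations (List.range others.length) s).foldl
    (fun st2 I =>
      I.foldl (pvBStepV T iN jN others st.1 (I.foldl (fun mask t => mask ||| 2 ^ t) 0) s) st2)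
    ((fun _ _ => 0), st.2)

-- the layered DP over sizes 1..kmax
def pvBDp (T : List (List Int)) (iN jN : Nat) (others : List Nat) (kmax : Nat) :
    (Nat → Nat → Int) × (Nat → Int) :=
  (List.range' 1 kmax).foldl (fun st sz => pvBPass T iN jN others sz st)
    ((fun _ _ => 0), fun _ => 0)

-- B's list of lengths (A's L-loop range with its break)
def pvBLs (mI : Int) : List Int → List Int
  | [] => []
  | L :: rest => if L - 2 > mI then [] else L :: pvBLs mI rest

def count_cycles_using_arc_by_length_alt (T : List (List Int)) (n : Int) (i : Int) (j : Int) (min_length : Int) : List (Int × Int) :=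
  let others : List Nat :=
    (List.range n.toNat).filter (fun u => decide ((u : Int) ≠ i) && decide ((u : Int) ≠ j))
  let Ls := pvBLs (others.length : Int) (PySem.List.pyRange min_length (n + 1) 2)
  let kmax := Ls.foldl (fun k L => max k (L - 2)) (0 : Int)
  let bySize := (pvBDp T i.toNat j.toNat others kmax.toNat).2
  Ls.map (fun L => (L, if L - 2 > 0 then bySize (L - 2).toNat else 0))

-- ===== PRECONDITION & SPEC =====
-- Pre_ excludes inputs where A's indexing/combinations can raise (non-n×n T, i or j outside
-- [0,n), min_length < 2 while the L-loop runs); A still RETURNS on a few such inputs when the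
-- loop body never touches T (e.g. negative i/j that Python's index wraparound would accept) —
-- excluded only because the ports index without wraparound, and A and B agree there anyway.
def Pre_count_cycles_using_arc_by_length (T : List (List Int)) (n : Int) (i : Int) (j : Int) (min_length : Int) : Prop :=
  min_length > n ∨
  (0 ≤ n ∧ T.length = n.toNat ∧ (∀ row ∈ T, row.length = n.toNat) ∧
   0 ≤ i ∧ i < n ∧ 0 ≤ j ∧ j < n ∧ 2 ≤ min_length)
instance (T : List (List Int)) (n : Int) (i : Int) (j : Int) (min_length : Int) : Decidable (Pre_count_cycles_using_arc_by_length T n i j min_length) := by unfold Pre_count_cycles_using_arc_by_length; infer_instance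

def pvWitness_count_cycles_using_arc_by_length : List (List Int) × Int × Int × Int × Int :=
  ([[0, 1, 1], [1, 0, 1], [1, 1, 0]], 3, 0, 1, 3)

def Spec_count_cycles_using_arc_by_length (T : List (List Int)) (n : Int) (i : Int) (j : Int) (min_length : Int) (out : List (Int × Int)) : Prop := out = count_cycles_using_arc_by_length_alt T n i j min_length
instance (T : List (List Int)) (n : Int) (i : Int) (j : Int) (min_length : Int) (out : List (Int × Int)) : Decidable (Spec_count_cycles_using_arc_by_length T n i j min_length out) := by unfold Spec_count_cycles_using_arc_by_length; infer_instance

-- ===== CLAIM (what is proved, stated in full; the proofs are below) =====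
def Claim_equal_count_cycles_using_arc_by_length : Prop := ∀ (T : List (List Int)) (n : Int) (i : Int) (j : Int) (min_length : Int), Dom_count_cycles_using_arc_by_length T n i j min_length → Pre_count_cycles_using_arc_by_length T n i j min_length → Spec_count_cycles_using_arc_by_length T n i j min_length (count_cycles_using_arc_by_length T n i j min_length)

-- ===== LEMMAS AND PROOFS =====

-- ---- generic bit lemmas ----

theorem pvBit_xor_lt {m v : Nat} (h : m.testBit v = true) : m ^^^ 2 ^ v < m := by
  apply Nat.lt_of_testBit v ?_ h ?_
  · simp [Nat.testBit_xor, h]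
  · intro j hj
    simp [Nat.testBit_xor, Nat.testBit_two_pow, Nat.ne_of_lt hj]

theorem pvBit_or_eq_xor {m : Nat} (u : Nat) (h : m.testBit u = false) :
    m ||| 2 ^ u = m ^^^ 2 ^ u := by
  apply Nat.eq_of_testBit_eq
  intro k
  by_cases hk : k = u
  · subst hk; simp [Nat.testBit_or, Nat.testBit_xor, h]
  · simp [Nat.testBit_or, Nat.testBit_xor, show u ≠ k from fun e => hk e.symm]

theorem pvBit_or_testBit {m u : Nat} (h : m.testBit u = false) :
    (m ||| 2 ^ u).testBit u = true ∧ (m ||| 2 ^ u) ^^^ 2 ^ u = m := by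
  constructor
  · simp [Nat.testBit_or, Nat.testBit_two_pow]
  · rw [pvBit_or_eq_xor u h, Nat.xor_assoc, Nat.xor_self, Nat.xor_zero]

-- ---- the common path-count specification ----
-- PC T jN vs mask v = number of ways to order the vertices of `mask` into a path that
-- starts at a vs-vertex reachable from row jN and ends at local vertex v.

def pcF (T : List (List Int)) (jN : Nat) (vs : List Nat) : Nat → Nat → Nat → Int
  | 0, _, _ => 0
  | fuel + 1, mask, v =>
    if v < vs.length ∧ mask.testBit v then
      if mask ^^^ 2 ^ v = 0 then (if pvEnt T jN (vs.getD v 0) ≠ 0 then 1 else 0)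
      else ((List.range vs.length).map (fun u =>
        if (mask ^^^ 2 ^ v).testBit u ∧ pvEnt T (vs.getD u 0) (vs.getD v 0) ≠ 0 then
          pcF T jN vs fuel (mask ^^^ 2 ^ v) u else 0)).sum
    else 0

def PC (T : List (List Int)) (jN : Nat) (vs : List Nat) (mask v : Nat) : Int :=
  pcF T jN vs mask mask v

theorem pcF_stab (T : List (List Int)) (jN : Nat) (vs : List Nat) :
    ∀ mask fuel₁ fuel₂ v, mask ≤ fuel₁ → mask ≤ fuel₂ →
      pcF T jN vs fuel₁ mask v = pcF T jN vs fuel₂ mask v := by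
  intro mask
  induction mask using Nat.strong_induction_on with
  | _ mask ih =>
    intro fuel₁ fuel₂ v h1 h2
    match fuel₁, fuel₂ with
    | 0, 0 => rfl
    | 0, f + 1 =>
      have : mask = 0 := by omega
      subst this
      simp [pcF]
    | f + 1, 0 =>
      have : mask = 0 := by omega
      subst this
      simp [pcF]
    | f + 1, g + 1 =>
      simp only [pcF]
      by_cases hb : v < vs.length ∧ mask.testBit v
      · rw [if_pos hb, if_pos hb]
        by_cases hz : mask ^^^ 2 ^ v = 0
        · rw [if_pos hz, if_pos hz]
        · rw [if_neg hz, if_neg hz]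
          apply congrArg List.sum
          apply List.map_congr_left
          intro u _
          by_cases hc : (mask ^^^ 2 ^ v).testBit u ∧ pvEnt T (vs.getD u 0) (vs.getD v 0) ≠ 0
          · have hlt : mask ^^^ 2 ^ v < mask := pvBit_xor_lt hb.2
            rw [if_pos hc, if_pos hc]
            exact ih _ hlt f g u (by omega) (by omega)
          · rw [if_neg hc, if_neg hc]
      · rw [if_neg hb, if_neg hb]

theorem PC_eq (T : List (List Int)) (jN : Nat) (vs : List Nat) (mask v : Nat) :
    PC T jN vs mask v =
      if v < vs.length ∧ mask.testBit v then
        if mask ^^^ 2 ^ v = 0 then (if pvEnt T jN (vs.getD v 0) ≠ 0 then 1 else 0)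
        else ((List.range vs.length).map (fun u =>
          if (mask ^^^ 2 ^ v).testBit u ∧ pvEnt T (vs.getD u 0) (vs.getD v 0) ≠ 0 then
            PC T jN vs (mask ^^^ 2 ^ v) u else 0)).sum
      else 0 := by
  by_cases hb : v < vs.length ∧ mask.testBit v
  · have hpos : mask ≠ 0 := by
      intro h0; subst h0; simp [Nat.testBit_zero] at hb
    obtain ⟨f, hf⟩ : ∃ f, mask = f + 1 := ⟨mask - 1, by omega⟩
    subst hf
    rw [PC]
    simp only [pcF]
    rw [if_pos hb, if_pos hb]
    by_cases hz : (f + 1) ^^^ 2 ^ v = 0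
    · rw [if_pos hz, if_pos hz]
    · rw [if_neg hz, if_neg hz]
      apply congrArg List.sum
      apply List.map_congr_left
      intro u _
      by_cases hc : ((f + 1) ^^^ 2 ^ v).testBit u ∧ pvEnt T (vs.getD u 0) (vs.getD v 0) ≠ 0
      · have hlt : (f + 1) ^^^ 2 ^ v < f + 1 := pvBit_xor_lt hb.2
        rw [if_pos hc, if_pos hc]
        exact pcF_stab T jN vs _ f _ u (by omega) (le_refl _)
      · rw [if_neg hc, if_neg hc]
  · rw [PC]
    match mask with
    | 0 => rw [if_neg hb]; rfl
    | f + 1 => simp only [pcF]; rw [if_neg hb, if_neg hb]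

theorem PC_out (T : List (List Int)) (jN : Nat) (vs : List Nat) (mask v : Nat)
    (h : ¬(v < vs.length ∧ mask.testBit v)) : PC T jN vs mask v = 0 := by
  rw [PC_eq]; simp [h]

theorem PC_nonneg (T : List (List Int)) (jN : Nat) (vs : List Nat) :
    ∀ mask v, 0 ≤ PC T jN vs mask v := by
  intro mask
  induction mask using Nat.strong_induction_on with
  | _ mask ih =>
    intro v
    rw [PC_eq]
    by_cases hb : v < vs.length ∧ mask.testBit v
    · rw [if_pos hb]
      by_cases hz : mask ^^^ 2 ^ v = 0
      · rw [if_pos hz]; split <;> omega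
      · rw [if_neg hz]
        apply List.sum_nonneg
        intro x hx
        simp only [List.mem_map] at hx
        obtain ⟨u, _, rfl⟩ := hx
        split
        · exact ih _ (pvBit_xor_lt hb.2) u
        · omega
    · rw [if_neg hb]

-- ---- popcount (proof-side helper) ----

def pvPop : Nat → Nat
  | 0 => 0
  | m + 1 => (m + 1) % 2 + pvPop ((m + 1) / 2)
decreasing_by exact Nat.div_lt_self (Nat.succ_pos m) (by omega)

theorem pvFoldl_if_add {α : Type} (P : α → Prop) [DecidablePred P] (g : α → Int) :
    ∀ (l : List α) (a : Int),
      l.foldl (fun acc x => if P x then acc + g x else acc) a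
        = a + (l.map (fun x => if P x then g x else 0)).sum := by
  intro l
  induction l with
  | nil => intro a; simp
  | cons x t ih =>
    intro a
    by_cases hx : P x
    · simp only [List.foldl_cons, List.map_cons, List.sum_cons, if_pos hx, ih]
      ring
    · simp only [List.foldl_cons, List.map_cons, List.sum_cons, if_neg hx, ih]
      ring

theorem pvBVal_eq (T : List (List Int)) (jN : Nat) (others : List Nat)
    (prev : Nat → Nat → Int) (mask v : Nat) (hv : v < others.length)
    (hbit : mask.testBit v = true)
    (Hf : ∀ u, prev (mask ^^^ 2 ^ v) u = PC T jN others (mask ^^^ 2 ^ v) u) :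
    pvBVal T jN others prev (mask ^^^ 2 ^ v) v = PC T jN others mask v := by
  rw [PC_eq, if_pos ⟨hv, hbit⟩]
  by_cases hz : mask ^^^ 2 ^ v = 0
  · rw [if_pos hz, pvBVal, if_pos hz]
  · rw [if_neg hz, pvBVal, if_neg hz]
    rw [pvFoldl_if_add
      (fun u => (mask ^^^ 2 ^ v).testBit u ∧ pvEnt T (others.getD u 0) (others.getD v 0) ≠ 0)
      (fun u => prev (mask ^^^ 2 ^ v) u)]
    rw [zero_add]
    apply congrArg List.sum
    apply List.map_congr_left
    intro u _
    by_cases hc : (mask ^^^ 2 ^ v).testBit u ∧ pvEnt T (others.getD u 0) (others.getD v 0) ≠ 0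
    · rw [if_pos hc, if_pos hc, Hf u]
    · rw [if_neg hc, if_neg hc]

-- ---- A side: the per-combination push DP also computes PC ----

-- state of A's dp after the mask loop has processed masks 1..M
def pvG (T : List (List Int)) (jN : Nat) (vs : List Nat) (M p q : Nat) : Int :=
  if q < vs.length ∧ p.testBit q ∧ p ^^^ 2 ^ q ≤ M then PC T jN vs p q else 0

theorem pvAInit_eq (T : List (List Int)) (jN : Nat) (vs : List Nat) :
    ∀ (ks : List Nat) (f : Nat → Nat → Int),
      ks.foldl (fun f k => if pvEnt T jN (vs.getD k 0) ≠ 0 then pvUpd f (2 ^ k) k 1 else f) f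
        = fun p q => if q ∈ ks ∧ p = 2 ^ q ∧ pvEnt T jN (vs.getD q 0) ≠ 0 then 1 else f p q := by
  intro ks
  induction ks with
  | nil => intro f; funext p q; simp
  | cons k ks ih =>
    intro f
    rw [List.foldl_cons, ih]
    funext p q
    by_cases h1 : q ∈ ks ∧ p = 2 ^ q ∧ pvEnt T jN (vs.getD q 0) ≠ 0
    · rw [if_pos h1, if_pos ⟨by simp [h1.1], h1.2⟩]
    · rw [if_neg h1]
      by_cases h2 : q ∈ k :: ks ∧ p = 2 ^ q ∧ pvEnt T jN (vs.getD q 0) ≠ 0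
      · have hqk : q = k := by
          rcases List.mem_cons.mp h2.1 with h | h
          · exact h
          · exact absurd ⟨h, h2.2⟩ h1
        rw [if_pos h2]
        subst hqk
        rw [if_pos h2.2.2, pvUpd, if_pos ⟨h2.2.1, rfl⟩]
      · rw [if_neg h2]
        by_cases hst : pvEnt T jN (vs.getD k 0) ≠ 0
        · rw [if_pos hst, pvUpd, if_neg ?_]
          rintro ⟨rfl, rfl⟩
          exact h2 ⟨by simp, rfl, hst⟩
        · rw [if_neg hst]

theorem pvA_ufold (T : List (List Int)) (jN : Nat) (vs : List Nat) (mask v : Nat) :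
    ∀ (us : List Nat), us.Nodup → ∀ (g : Nat → Nat → Int),
      us.foldl (fun h u =>
        if mask.testBit u then h
        else if pvEnt T (vs.getD v 0) (vs.getD u 0) ≠ 0 then
          pvUpd h (mask ||| 2 ^ u) u (h (mask ||| 2 ^ u) u + h mask v)
        else h) g
      = fun p q =>
          if q ∈ us ∧ mask.testBit q = false ∧ pvEnt T (vs.getD v 0) (vs.getD q 0) ≠ 0 ∧
              p = mask ||| 2 ^ q then
            g p q + g mask v
          else g p q := by
  intro us
  induction us with
  | nil => intro _ g; funext p q; simp
  | cons u us ih =>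
    intro hnd g
    rw [List.foldl_cons, ih (by exact (List.nodup_cons.mp hnd).2)]
    have hucell : ∀ (h : Nat → Nat → Int) x,
        (if mask.testBit u then h
         else if pvEnt T (vs.getD v 0) (vs.getD u 0) ≠ 0 then
           pvUpd h (mask ||| 2 ^ u) u x
         else h) mask v = h mask v := by
      intro h x
      by_cases htb : mask.testBit u
      · rw [if_pos htb]
      · rw [if_neg htb]
        have hne : mask ||| 2 ^ u ≠ mask := by
          intro he
          have := (pvBit_or_testBit (Bool.eq_false_iff.mpr htb)).1
          rw [he] at this
          exact htb this
        by_cases hst : pvEnt T (vs.getD v 0) (vs.getD u 0) ≠ 0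
        · rw [if_pos hst, pvUpd, if_neg (by rintro ⟨he, _⟩; exact hne he.symm)]
        · rw [if_neg hst]
    funext p q
    set g1 := (if mask.testBit u then g
         else if pvEnt T (vs.getD v 0) (vs.getD u 0) ≠ 0 then
           pvUpd g (mask ||| 2 ^ u) u (g (mask ||| 2 ^ u) u + g mask v)
         else g) with hg1
    have hg1row : g1 mask v = g mask v := hucell g _
    by_cases h1 : q ∈ us ∧ mask.testBit q = false ∧ pvEnt T (vs.getD v 0) (vs.getD q 0) ≠ 0 ∧
        p = mask ||| 2 ^ q
    · rw [if_pos h1, if_pos ⟨by simp [h1.1], h1.2⟩, hg1row]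
      have hqu : q ≠ u := fun he => (List.nodup_cons.mp hnd).1 (he ▸ h1.1)
      have hg1pq : g1 p q = g p q := by
        rw [hg1]
        by_cases htb : mask.testBit u
        · rw [if_pos htb]
        · rw [if_neg htb]
          by_cases hst : pvEnt T (vs.getD v 0) (vs.getD u 0) ≠ 0
          · rw [if_pos hst, pvUpd, if_neg (by rintro ⟨_, he⟩; exact hqu he)]
          · rw [if_neg hst]
      rw [hg1pq]
    · rw [if_neg h1]
      by_cases h2 : q ∈ u :: us ∧ mask.testBit q = false ∧
          pvEnt T (vs.getD v 0) (vs.getD q 0) ≠ 0 ∧ p = mask ||| 2 ^ q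
      · have hqu : q = u := by
          rcases List.mem_cons.mp h2.1 with h | h
          · exact h
          · exact absurd ⟨h, h2.2⟩ h1
        rw [if_pos h2, hg1]
        subst hqu
        rw [if_neg (by simp [h2.2.1]), if_pos h2.2.2.1, pvUpd, if_pos ⟨h2.2.2.2, rfl⟩, h2.2.2.2]
      · rw [if_neg h2, hg1]
        by_cases htb : mask.testBit u
        · rw [if_pos htb]
        · rw [if_neg htb]
          by_cases hst : pvEnt T (vs.getD v 0) (vs.getD u 0) ≠ 0
          · rw [if_pos hst, pvUpd, if_neg ?_]
            rintro ⟨rfl, rfl⟩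
            exact h2 ⟨by simp, Bool.eq_false_iff.mpr htb, hst, rfl⟩
          · rw [if_neg hst]

theorem pvA_vfold (T : List (List Int)) (jN : Nat) (vs : List Nat) (mask : Nat) :
    ∀ (ws : List Nat) (g : Nat → Nat → Int),
      ws.foldl (fun g v =>
        if ¬ mask.testBit v ∨ g mask v = 0 then g
        else (List.range vs.length).foldl (fun h u =>
          if mask.testBit u then h
          else if pvEnt T (vs.getD v 0) (vs.getD u 0) ≠ 0 then
            pvUpd h (mask ||| 2 ^ u) u (h (mask ||| 2 ^ u) u + h mask v)
          else h) g) g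
      = fun p q =>
          if q < vs.length ∧ mask.testBit q = false ∧ p = mask ||| 2 ^ q then
            g p q + ((ws.map (fun v =>
              if mask.testBit v ∧ g mask v ≠ 0 ∧ pvEnt T (vs.getD v 0) (vs.getD q 0) ≠ 0 then
                g mask v else 0)).sum)
          else g p q := by
  intro ws
  induction ws with
  | nil => intro g; funext p q; simp
  | cons v ws ih =>
    intro g
    rw [List.foldl_cons]
    by_cases hskip : ¬ mask.testBit v ∨ g mask v = 0
    · rw [if_pos hskip, ih]
      funext p q
      have hterm : (if mask.testBit v ∧ g mask v ≠ 0 ∧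
          pvEnt T (vs.getD v 0) (vs.getD q 0) ≠ 0 then g mask v else 0) = 0 := by
        rw [if_neg]
        rintro ⟨ha, hb, _⟩
        rcases hskip with h | h
        · exact h ha
        · exact hb h
      by_cases h1 : q < vs.length ∧ mask.testBit q = false ∧ p = mask ||| 2 ^ q
      · rw [if_pos h1, if_pos h1]
        rw [List.map_cons, List.sum_cons, hterm, zero_add]
      · rw [if_neg h1, if_neg h1]
    · rw [if_neg hskip]
      push_neg at hskip
      obtain ⟨htbv, hgv⟩ := hskip
      rw [pvA_ufold T jN vs mask v (List.range vs.length) List.nodup_range g, ih]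
      funext p q
      dsimp only
      have hrow : ∀ w, (if w ∈ List.range vs.length ∧ mask.testBit w = false ∧
          pvEnt T (vs.getD v 0) (vs.getD w 0) ≠ 0 ∧ mask = mask ||| 2 ^ w then
          g mask w + g mask v else g mask w) = g mask w := by
        intro w
        rw [if_neg]
        rintro ⟨_, htb, _, he⟩
        have hb := (pvBit_or_testBit htb).1
        rw [← he] at hb
        rw [hb] at htb
        exact Bool.true_eq_false.mp htb
      simp only [hrow]
      by_cases h1 : q < vs.length ∧ mask.testBit q = false ∧ p = mask ||| 2 ^ q
      · rw [if_pos h1, if_pos h1, List.map_cons, List.sum_cons]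
        by_cases hst : pvEnt T (vs.getD v 0) (vs.getD q 0) ≠ 0
        · rw [if_pos ⟨List.mem_range.mpr h1.1, h1.2.1, hst, h1.2.2⟩,
            if_pos ⟨htbv, hgv, hst⟩]
          ring
        · rw [if_neg (by rintro ⟨_, _, hc, _⟩; exact hst hc),
            if_neg (by rintro ⟨_, _, hc⟩; exact hst hc)]
          ring
      · rw [if_neg h1, if_neg h1, if_neg]
        rintro ⟨hq, htb, _, he⟩
        exact h1 ⟨List.mem_range.mp hq, htb, he⟩

theorem pvAInner_G (T : List (List Int)) (jN : Nat) (vs : List Nat) (M : Nat) :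
    pvAInner T vs (M + 1) (fun p q => pvG T jN vs M p q)
      = fun p q => pvG T jN vs (M + 1) p q := by
  rw [pvAInner, pvA_vfold T jN vs (M + 1) (List.range vs.length)
    (fun p q => pvG T jN vs M p q)]
  funext p q
  by_cases h1 : q < vs.length ∧ (M + 1).testBit q = false ∧ p = (M + 1) ||| 2 ^ q
  · rw [if_pos h1]
    have hbits := pvBit_or_testBit (u := q) (m := M + 1) h1.2.1
    have htbp : p.testBit q = true := h1.2.2 ▸ hbits.1
    have hrest : p ^^^ 2 ^ q = M + 1 := h1.2.2 ▸ hbits.2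
    have hG0 : pvG T jN vs M p q = 0 := by
      rw [pvG, if_neg]
      rintro ⟨_, _, hle⟩
      omega
    rw [hG0, zero_add]
    have hGnew : pvG T jN vs (M + 1) p q = PC T jN vs p q := by
      rw [pvG, if_pos ⟨h1.1, htbp, by omega⟩]
    rw [hGnew, PC_eq, if_pos ⟨h1.1, htbp⟩, hrest, if_neg (by omega : ¬ M + 1 = 0)]
    apply congrArg List.sum
    apply List.map_congr_left
    intro w hw
    have hwlen : w < vs.length := List.mem_range.mp hw
    by_cases htbw : (M + 1).testBit w
    · have hGw : pvG T jN vs M (M + 1) w = PC T jN vs (M + 1) w := by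
        rw [pvG, if_pos ⟨hwlen, htbw, by have := pvBit_xor_lt htbw; omega⟩]
      rw [hGw]
      by_cases hst : pvEnt T (vs.getD w 0) (vs.getD q 0) ≠ 0
      · by_cases hz : PC T jN vs (M + 1) w = 0
        · rw [if_neg (by rintro ⟨_, hc, _⟩; exact hc hz), if_pos ⟨htbw, hst⟩, hz]
        · rw [if_pos ⟨htbw, hz, hst⟩, if_pos ⟨htbw, hst⟩]
      · rw [if_neg (by rintro ⟨_, _, hc⟩; exact hst hc), if_neg (by rintro ⟨_, hc⟩; exact hst hc)]
    · have hGw : pvG T jN vs M (M + 1) w = 0 := by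
        rw [pvG, if_neg (by rintro ⟨_, hc, _⟩; exact htbw hc)]
      rw [if_neg (by rintro ⟨hc, _, _⟩; exact htbw hc),
        if_neg (by rintro ⟨hc, _⟩; exact htbw hc)]
  · rw [if_neg h1]
    rw [pvG, pvG]
    by_cases h2 : q < vs.length ∧ p.testBit q ∧ p ^^^ 2 ^ q ≤ M
    · rw [if_pos h2, if_pos ⟨h2.1, h2.2.1, by omega⟩]
    · rw [if_neg h2, if_neg]
      rintro ⟨hq, htb, hle⟩
      by_cases hR : p ^^^ 2 ^ q ≤ M
      · exact h2 ⟨hq, htb, hR⟩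
      · have hrest : p ^^^ 2 ^ q = M + 1 := by omega
        have htbc : (M + 1).testBit q = false := by
          rw [← hrest]
          simp [Nat.testBit_xor, htb, Nat.testBit_two_pow]
        have hp : p = (M + 1) ||| 2 ^ q := by
          rw [pvBit_or_eq_xor q htbc, ← hrest, Nat.xor_assoc, Nat.xor_self, Nat.xor_zero]
        exact h1 ⟨hq, htbc, hp⟩

theorem pvADp_eq (T : List (List Int)) (jN : Nat) (vs : List Nat) :
    pvADp T jN vs = fun p q => pvG T jN vs (2 ^ vs.length - 1) p q := by
  rw [pvADp, pvAInit_eq T jN vs (List.range vs.length) (fun _ _ => 0)]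
  have hinit : (fun p q => if q ∈ List.range vs.length ∧ p = 2 ^ q ∧
      pvEnt T jN (vs.getD q 0) ≠ 0 then 1 else (0 : Int))
      = fun p q => pvG T jN vs 0 p q := by
    funext p q
    by_cases hql : q < vs.length
    · by_cases hp : p = 2 ^ q
      · subst hp
        have htb : (2 ^ q : Nat).testBit q = true := by simp [Nat.testBit_two_pow]
        have hx : (2 ^ q : Nat) ^^^ 2 ^ q = 0 := Nat.xor_self _
        by_cases hst : pvEnt T jN (vs.getD q 0) ≠ 0
        · rw [if_pos ⟨List.mem_range.mpr hql, rfl, hst⟩, pvG,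
            if_pos ⟨hql, htb, by simp [hx]⟩, PC_eq, if_pos ⟨hql, htb⟩, hx,
            if_pos rfl, if_pos hst]
        · rw [if_neg (by rintro ⟨_, _, hc⟩; exact hst hc), pvG,
            if_pos ⟨hql, htb, by simp [hx]⟩, PC_eq, if_pos ⟨hql, htb⟩, hx,
            if_pos rfl, if_neg hst]
      · rw [if_neg (by rintro ⟨_, hc, _⟩; exact hp hc), pvG, if_neg]
        rintro ⟨_, _, hle⟩
        exact hp (Nat.xor_eq_zero_iff.mp (by omega))
    · rw [if_neg (by rintro ⟨hm, _, _⟩; exact hql (List.mem_range.mp hm)), pvG,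
        if_neg (by rintro ⟨hc, _, _⟩; exact hql hc)]
  rw [hinit]
  generalize 2 ^ vs.length - 1 = M
  induction M with
  | zero => simp [List.range'_zero]
  | succ M ih =>
    rw [List.range'_1_concat, List.foldl_append, List.foldl_cons, List.foldl_nil, ih,
      show 1 + M = M + 1 from by omega, pvAInner_G]

theorem pvACount_eq (T : List (List Int)) (iN jN : Nat) (vs : List Nat) :
    pvACount T iN jN vs = ((List.range vs.length).map (fun v =>
      if pvEnt T (vs.getD v 0) iN ≠ 0 then PC T jN vs (2 ^ vs.length - 1) v else 0)).sum := by
  simp only [pvACount]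
  rw [pvADp_eq]
  rw [pvFoldl_if_add (fun v => (pvG T jN vs (2 ^ vs.length - 1) (2 ^ vs.length - 1) v > 0 ∧
    pvEnt T (vs.getD v 0) iN ≠ 0)) (fun v => pvG T jN vs (2 ^ vs.length - 1) (2 ^ vs.length - 1) v),
    zero_add]
  apply congrArg List.sum
  apply List.map_congr_left
  intro v hv
  have hvlen : v < vs.length := List.mem_range.mp hv
  have htb : (2 ^ vs.length - 1).testBit v = true := by
    rw [Nat.testBit_two_pow_sub_one]
    simp [hvlen]
  have hG : pvG T jN vs (2 ^ vs.length - 1) (2 ^ vs.length - 1) v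
      = PC T jN vs (2 ^ vs.length - 1) v := by
    rw [pvG, if_pos ⟨hvlen, htb, by have := pvBit_xor_lt htb; omega⟩]
  rw [hG]
  by_cases hst : pvEnt T (vs.getD v 0) iN ≠ 0
  · by_cases hz : PC T jN vs (2 ^ vs.length - 1) v > 0
    · rw [if_pos ⟨hz, hst⟩, if_pos hst]
    · have h0 : PC T jN vs (2 ^ vs.length - 1) v = 0 := by
        have := PC_nonneg T jN vs (2 ^ vs.length - 1) v
        omega
      rw [if_neg (by rintro ⟨hc, _⟩; exact hz hc), if_pos hst, h0]
  · rw [if_neg (by rintro ⟨_, hc⟩; exact hst hc), if_neg hst]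

-- ---- lifting: PC of a sublist = PC of `others` on the lifted bitmask ----

def pvLift : List Nat → Nat → Nat
  | [], _ => 0
  | a :: I, msk => (if msk.testBit 0 then 2 ^ a else 0) ||| pvLift I (msk >>> 1)

theorem pvIf_and (p q : Prop) [Decidable p] [Decidable q] (x : Int) :
    (if p ∧ q then x else 0) = if p then (if q then x else 0) else 0 := by
  by_cases hp : p
  · by_cases hq : q
    · rw [if_pos ⟨hp, hq⟩, if_pos hp, if_pos hq]
    · rw [if_neg (by rintro ⟨_, h⟩; exact hq h), if_pos hp, if_neg hq]
  · rw [if_neg (by rintro ⟨h, _⟩; exact hp h), if_neg hp]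

theorem pvLift_testBit : ∀ (I : List Nat) (msk w : Nat),
    ((pvLift I msk).testBit w = true ↔
      ∃ t, t < I.length ∧ I.getD t 0 = w ∧ msk.testBit t = true) := by
  intro I
  induction I with
  | nil =>
    intro msk w
    simp [pvLift, Nat.zero_testBit]
  | cons a I ih =>
    intro msk w
    rw [pvLift, Nat.testBit_or]
    constructor
    · intro h
      rcases Bool.or_eq_true_iff.mp h with h | h
      · have ha : a = w ∧ msk.testBit 0 = true := by
          by_cases h0 : msk.testBit 0 = true
          · rw [if_pos h0] at h
            exact ⟨by simpa [Nat.testBit_two_pow] using h, h0⟩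
          · rw [if_neg h0] at h
            simp [Nat.zero_testBit] at h
        exact ⟨0, by simp, ha.1, ha.2⟩
      · obtain ⟨t, ht, hg, htb⟩ := (ih (msk >>> 1) w).mp h
        refine ⟨t + 1, by simpa using Nat.succ_lt_succ ht, by simpa using hg, ?_⟩
        rw [Nat.testBit_shiftRight] at htb
        simpa [Nat.add_comm 1 t] using htb
    · rintro ⟨t, ht, hg, htb⟩
      apply Bool.or_eq_true_iff.mpr
      match t with
      | 0 =>
        left
        simp only [List.getD_cons_zero] at hg
        rw [if_pos htb]
        simp [Nat.testBit_two_pow, hg]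
      | t + 1 =>
        right
        apply (ih (msk >>> 1) w).mpr
        refine ⟨t, by simp at ht; omega, by simpa using hg, ?_⟩
        rw [Nat.testBit_shiftRight, Nat.add_comm 1 t]
        exact htb

theorem pvLift_lt (I : List Nat) (msk m : Nat) (h : ∀ x ∈ I, x < m) :
    pvLift I msk < 2 ^ m := by
  apply Nat.lt_pow_two_of_testBit
  intro i hi
  by_contra hne
  have hb : (pvLift I msk).testBit i = true := by
    cases hx : (pvLift I msk).testBit i
    · exact absurd hx hne
    · rfl
  obtain ⟨t, ht, hg, _⟩ := (pvLift_testBit I msk i).mp hb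
  have : I.getD t 0 ∈ I := by
    rw [List.getD_eq_getElem I 0 ht]
    exact List.getElem_mem ht
  have := h _ this
  omega

theorem pvLift_getD_testBit (I : List Nat) (hnd : I.Nodup) (t : Nat) (ht : t < I.length)
    (msk : Nat) : (pvLift I msk).testBit (I.getD t 0) = msk.testBit t := by
  cases htb : msk.testBit t
  · cases hlb : (pvLift I msk).testBit (I.getD t 0)
    · rfl
    · obtain ⟨t', ht', hg, htb'⟩ := (pvLift_testBit I msk _).mp hlb
      have : t' = t := by
        rw [List.getD_eq_getElem I 0 ht', List.getD_eq_getElem I 0 ht] at hg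
        exact (List.Nodup.getElem_inj_iff hnd).mp hg
      rw [this] at htb'
      rw [htb'] at htb
      exact absurd htb (by simp)
  · exact (pvLift_testBit I msk _).mpr ⟨t, ht, rfl, htb⟩

theorem pvLift_xor (I : List Nat) (hnd : I.Nodup) (t : Nat) (ht : t < I.length)
    (msk : Nat) (htb : msk.testBit t = true) :
    pvLift I (msk ^^^ 2 ^ t) = pvLift I msk ^^^ 2 ^ (I.getD t 0) := by
  apply Nat.eq_of_testBit_eq
  intro w
  rw [Nat.testBit_xor]
  by_cases hw : ∃ t', t' < I.length ∧ I.getD t' 0 = w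
  · obtain ⟨t', ht', hg⟩ := hw
    subst hg
    rw [pvLift_getD_testBit I hnd t' ht', pvLift_getD_testBit I hnd t' ht',
      Nat.testBit_xor, Nat.testBit_two_pow, Nat.testBit_two_pow]
    have : (decide (t = t')) = decide (I.getD t 0 = I.getD t' 0) := by
      by_cases he : t = t'
      · subst he; simp
      · have : I.getD t 0 ≠ I.getD t' 0 := by
          rw [List.getD_eq_getElem I 0 ht, List.getD_eq_getElem I 0 ht']
          exact fun hc => he ((List.Nodup.getElem_inj_iff hnd).mp hc)
        rw [decide_eq_false he, decide_eq_false this]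
    rw [this]
  · push_neg at hw
    have h1 : (pvLift I (msk ^^^ 2 ^ t)).testBit w = false := by
      cases hx : (pvLift I (msk ^^^ 2 ^ t)).testBit w
      · rfl
      · obtain ⟨t', ht', hg, _⟩ := (pvLift_testBit I _ _).mp hx
        exact absurd hg (hw t' ht')
    have h2 : (pvLift I msk).testBit w = false := by
      cases hx : (pvLift I msk).testBit w
      · rfl
      · obtain ⟨t', ht', hg, _⟩ := (pvLift_testBit I _ _).mp hx
        exact absurd hg (hw t' ht')
    have h3 : (2 ^ (I.getD t 0)).testBit w = false := by
      rw [Nat.testBit_two_pow]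
      simp only [decide_eq_false_iff_not]
      exact fun hc => hw t ht hc
    rw [h1, h2, h3]
    rfl

theorem pvLift_eq_zero (I : List Nat) (msk : Nat) (h : msk < 2 ^ I.length) :
    pvLift I msk = 0 ↔ msk = 0 := by
  constructor
  · intro h0
    by_contra hne
    obtain ⟨t, htb⟩ : ∃ t, msk.testBit t = true := by
      by_contra hall
      push_neg at hall
      exact hne (Nat.eq_of_testBit_eq (fun i => by
        rw [Nat.zero_testBit]
        cases hx : msk.testBit i
        · rfl
        · exact absurd hx (by simp [hall i])))
    have ht : t < I.length := by
      by_contra hge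
      rw [Nat.testBit_eq_false_of_lt (lt_of_lt_of_le h
        (Nat.pow_le_pow_right (by omega) (by omega)))] at htb
      exact absurd htb (by simp)
    have := (pvLift_testBit I msk (I.getD t 0)).mpr ⟨t, ht, rfl, htb⟩
    rw [h0, Nat.zero_testBit] at this
    exact absurd this (by simp)
  · rintro rfl
    apply Nat.eq_of_testBit_eq
    intro i
    rw [Nat.zero_testBit]
    cases hx : (pvLift I 0).testBit i
    · rfl
    · obtain ⟨t, _, _, htb⟩ := (pvLift_testBit I 0 i).mp hx
      rw [Nat.zero_testBit] at htb
      exact absurd htb (by simp)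

theorem pvListSum_eq_finset (n : Nat) (f : Nat → Int) :
    ((List.range n).map f).sum = ∑ x ∈ Finset.range n, f x := rfl

theorem pvSum_reindex (m : Nat) (I : List Nat) (hnd : I.Nodup) (hb : ∀ x ∈ I, x < m)
    (msk : Nat) (F : Nat → Int) :
    ((List.range m).map (fun u => if (pvLift I msk).testBit u then F u else 0)).sum
      = ((List.range I.length).map (fun t => if msk.testBit t then F (I.getD t 0) else 0)).sum := by
  have keyU : ∀ u, (pvLift I msk).testBit u = true →
      I.idxOf u < I.length ∧ I.getD (I.idxOf u) 0 = u ∧ msk.testBit (I.idxOf u) = true := by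
    intro u hu
    obtain ⟨t, ht, hg, htb⟩ := (pvLift_testBit I msk u).mp hu
    have hmem : u ∈ I := by
      rw [← hg, List.getD_eq_getElem I 0 ht]
      exact List.getElem_mem ht
    have hidx : I.idxOf u < I.length := List.idxOf_lt_length_of_mem hmem
    have hgetidx : I.getD (I.idxOf u) 0 = u := by
      rw [List.getD_eq_getElem I 0 hidx]
      exact List.getElem_idxOf hidx
    have heq : I.idxOf u = t := by
      apply (List.Nodup.getElem_inj_iff hnd).mp
      rw [← List.getD_eq_getElem I 0 hidx, ← List.getD_eq_getElem I 0 ht, hgetidx, hg]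
    exact ⟨hidx, hgetidx, heq ▸ htb⟩
  have keyT : ∀ t, t < I.length → msk.testBit t = true →
      I.getD t 0 < m ∧ (pvLift I msk).testBit (I.getD t 0) = true ∧ I.idxOf (I.getD t 0) = t := by
    intro t ht htb
    have hmem : I.getD t 0 ∈ I := by
      rw [List.getD_eq_getElem I 0 ht]
      exact List.getElem_mem ht
    refine ⟨hb _ hmem, (pvLift_testBit I msk _).mpr ⟨t, ht, rfl, htb⟩, ?_⟩
    rw [List.getD_eq_getElem I 0 ht]
    exact List.Nodup.idxOf_getElem hnd t ht
  rw [pvListSum_eq_finset, pvListSum_eq_finset, ← Finset.sum_filter, ← Finset.sum_filter]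
  refine Finset.sum_bij' (i := fun u (_ : u ∈ (Finset.range m).filter
      (fun u => (pvLift I msk).testBit u)) => I.idxOf u)
    (j := fun t (_ : t ∈ (Finset.range I.length).filter (fun t => msk.testBit t)) => I.getD t 0)
    ?_ ?_ ?_ ?_ ?_
  · intro u hu
    rw [Finset.mem_filter, Finset.mem_range] at hu
    obtain ⟨h1, h2, h3⟩ := keyU u hu.2
    rw [Finset.mem_filter, Finset.mem_range]
    exact ⟨h1, h3⟩
  · intro t ht
    rw [Finset.mem_filter, Finset.mem_range] at ht
    obtain ⟨h1, h2, h3⟩ := keyT t ht.1 ht.2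
    rw [Finset.mem_filter, Finset.mem_range]
    exact ⟨h1, h2⟩
  · intro u hu
    rw [Finset.mem_filter, Finset.mem_range] at hu
    exact (keyU u hu.2).2.1
  · intro t ht
    rw [Finset.mem_filter, Finset.mem_range] at ht
    exact (keyT t ht.1 ht.2).2.2
  · intro u hu
    rw [Finset.mem_filter, Finset.mem_range] at hu
    rw [(keyU u hu.2).2.1]

theorem pvPC_lift (T : List (List Int)) (jN : Nat) (others : List Nat) (I : List Nat)
    (hnd : I.Nodup) (hb : ∀ x ∈ I, x < others.length) :
    ∀ msk, msk < 2 ^ I.length → ∀ v, v < I.length →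
      PC T jN (I.map (fun t => others.getD t 0)) msk v
        = PC T jN others (pvLift I msk) (I.getD v 0) := by
  have hlen : (I.map (fun t => others.getD t 0)).length = I.length := List.length_map ..
  have hgd : ∀ t, t < I.length →
      (I.map (fun t => others.getD t 0)).getD t 0 = others.getD (I.getD t 0) 0 := by
    intro t ht
    rw [List.getD_eq_getElem _ 0 (by omega), List.getElem_map, List.getD_eq_getElem I 0 ht]
  intro msk
  induction msk using Nat.strong_induction_on with
  | _ msk ihm =>
    intro hmsk v hv
    have hIv : I.getD v 0 ∈ I := by
      rw [List.getD_eq_getElem I 0 hv]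
      exact List.getElem_mem hv
    have hIvm : I.getD v 0 < others.length := hb _ hIv
    rw [PC_eq, PC_eq]
    by_cases htbv : msk.testBit v = true
    case neg =>
      rw [if_neg (by rintro ⟨_, hc⟩; exact htbv hc),
        if_neg (by
          rintro ⟨_, hc⟩
          rw [pvLift_getD_testBit I hnd v hv msk] at hc
          exact htbv hc)]
    case pos =>
      rw [if_pos (show v < (I.map (fun t => others.getD t 0)).length ∧ msk.testBit v = true
          from ⟨by rw [List.length_map]; omega, htbv⟩),
        if_pos (show I.getD v 0 < others.length ∧
            (pvLift I msk).testBit (I.getD v 0) = true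
          from ⟨hIvm, by rw [pvLift_getD_testBit I hnd v hv msk]; exact htbv⟩)]
      have hxor : pvLift I msk ^^^ 2 ^ (I.getD v 0) = pvLift I (msk ^^^ 2 ^ v) :=
        (pvLift_xor I hnd v hv msk htbv).symm
      have hrestlt : msk ^^^ 2 ^ v < msk := pvBit_xor_lt htbv
      have hrest2 : msk ^^^ 2 ^ v < 2 ^ I.length := by omega
      rw [hxor]
      by_cases hz : msk ^^^ 2 ^ v = 0
      · have hlz : pvLift I (msk ^^^ 2 ^ v) = 0 := by
          rw [hz]
          exact (pvLift_eq_zero I 0 (by positivity)).mpr rfl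
        rw [if_pos hz, if_pos hlz, hgd v hv]
      · rw [if_neg hz, if_neg (fun hc => hz ((pvLift_eq_zero I _ hrest2).mp hc))]
        have hLHS : ((List.range (I.map (fun t => others.getD t 0)).length).map (fun u =>
            if (msk ^^^ 2 ^ v).testBit u ∧
                pvEnt T ((I.map (fun t => others.getD t 0)).getD u 0)
                  ((I.map (fun t => others.getD t 0)).getD v 0) ≠ 0 then
              PC T jN (I.map (fun t => others.getD t 0)) (msk ^^^ 2 ^ v) u else 0)).sum
            = ((List.range I.length).map (fun t =>
            if (msk ^^^ 2 ^ v).testBit t then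
              (if pvEnt T (others.getD (I.getD t 0) 0) (others.getD (I.getD v 0) 0) ≠ 0 then
                PC T jN others (pvLift I (msk ^^^ 2 ^ v)) (I.getD t 0) else 0) else 0)).sum := by
          rw [hlen]
          apply congrArg List.sum
          apply List.map_congr_left
          intro t htm
          have ht : t < I.length := List.mem_range.mp htm
          rw [pvIf_and, hgd t ht, hgd v hv]
          by_cases htb : (msk ^^^ 2 ^ v).testBit t = true
          · rw [if_pos htb, if_pos htb]
            by_cases hed : pvEnt T (others.getD (I.getD t 0) 0) (others.getD (I.getD v 0) 0) ≠ 0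
            · rw [if_pos hed, if_pos hed, ihm _ hrestlt hrest2 t ht]
            · rw [if_neg hed, if_neg hed]
          · rw [if_neg htb, if_neg htb]
        rw [hLHS]
        have hRHS : ((List.range others.length).map (fun u =>
            if (pvLift I (msk ^^^ 2 ^ v)).testBit u ∧
                pvEnt T (others.getD u 0) (others.getD (I.getD v 0) 0) ≠ 0 then
              PC T jN others (pvLift I (msk ^^^ 2 ^ v)) u else 0)).sum
            = ((List.range others.length).map (fun u =>
            if (pvLift I (msk ^^^ 2 ^ v)).testBit u then
              (if pvEnt T (others.getD u 0) (others.getD (I.getD v 0) 0) ≠ 0 then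
                PC T jN others (pvLift I (msk ^^^ 2 ^ v)) u else 0) else 0)).sum := by
          apply congrArg List.sum
          apply List.map_congr_left
          intro u _
          rw [pvIf_and]
        rw [hRHS, pvSum_reindex others.length I hnd hb (msk ^^^ 2 ^ v)]

-- ---- combinatorics: subsets of size k ↔ bitmasks of popcount k ----

theorem pvPop_eq : ∀ (m msk : Nat), msk < 2 ^ m →
    pvPop msk = ((List.range m).filter (fun t => msk.testBit t)).length := by
  intro m
  induction m with
  | zero =>
    intro msk h
    have : msk = 0 := by simpa using h
    subst this
    simp [pvPop]
  | succ m ih =>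
    intro msk h
    match hm : msk with
    | 0 =>
      rw [pvPop]
      refine Eq.symm ?_
      simp only [List.length_eq_zero_iff]
      rw [List.filter_eq_nil_iff]
      intro t _
      simp [Nat.zero_testBit]
    | s + 1 =>
      rw [pvPop, List.range_succ_eq_map, List.filter_cons, List.filter_map]
      have hhalf : (s + 1) / 2 < 2 ^ m := by
        have h2 : s + 1 < 2 ^ (m + 1) := h
        rw [pow_succ] at h2
        omega
      have hcomp : ((fun t => (s + 1).testBit t) ∘ Nat.succ) = fun t => ((s + 1) / 2).testBit t := by
        funext t
        simp [Function.comp, Nat.testBit_add_one]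
      rw [hcomp, ih _ hhalf]
      by_cases h0 : (s + 1).testBit 0
      · rw [if_pos h0]
        have : (s + 1) % 2 = 1 := by
          rw [Nat.testBit_zero] at h0
          simpa using h0
        simp [this, List.length_map]
        omega
      · rw [if_neg h0]
        have : (s + 1) % 2 = 0 := by
          rw [Nat.testBit_zero] at h0
          simp at h0
          omega
        simp [this, List.length_map]

theorem pvMaskOf_testBit (I : List Nat) (w : Nat) :
    ((pvLift I (2 ^ I.length - 1)).testBit w = true) ↔ w ∈ I := by
  rw [pvLift_testBit]
  constructor
  · rintro ⟨t, ht, hg, _⟩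
    rw [← hg, List.getD_eq_getElem I 0 ht]
    exact List.getElem_mem ht
  · intro hw
    obtain ⟨t, ht, hg⟩ := List.mem_iff_getElem.mp hw
    refine ⟨t, ht, by rw [List.getD_eq_getElem I 0 ht]; exact hg, ?_⟩
    rw [Nat.testBit_two_pow_sub_one]
    simp [ht]

theorem pvFilter_eq_of_sublist {l I : List Nat} (h : I.Sublist l) (hnd : l.Nodup) :
    l.filter (fun x => decide (x ∈ I)) = I := by
  induction h with
  | slnil => rfl
  | cons x h ih =>
    rename_i I' l'
    rw [List.filter_cons]
    have hx : x ∉ l' := (List.nodup_cons.mp hnd).1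
    have hxI : x ∉ I' := fun hc => hx (h.mem hc)
    rw [if_neg (by simpa using hxI)]
    exact ih (List.nodup_cons.mp hnd).2
  | cons₂ x h ih =>
    rename_i I' l'
    rw [List.filter_cons, if_pos (by simp)]
    have hx : x ∉ l' := (List.nodup_cons.mp hnd).1
    have : l'.filter (fun y => decide (y ∈ x :: I')) = l'.filter (fun y => decide (y ∈ I')) := by
      apply List.filter_congr
      intro y hy
      have : y ≠ x := fun he => hx (he ▸ hy)
      simp [this]
    rw [this, ih (List.nodup_cons.mp hnd).2]

theorem pvMaskOf_facts (m s : Nat) (I : List Nat)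
    (hI : I ∈ PySem.List.combinations (List.range m) s) :
    I.Nodup ∧ (∀ x ∈ I, x < m) ∧ I.length = s ∧ I.Sublist (List.range m) ∧
      pvLift I (2 ^ I.length - 1) < 2 ^ m ∧ pvPop (pvLift I (2 ^ I.length - 1)) = s := by
  obtain ⟨hsub, hlen⟩ := (PySem.List.mem_combinations_iff _ s I).mp hI
  have hnd : I.Nodup := hsub.nodup (List.nodup_range)
  have hbnd : ∀ x ∈ I, x < m := fun x hx => List.mem_range.mp (hsub.mem hx)
  have hlt : pvLift I (2 ^ I.length - 1) < 2 ^ m := pvLift_lt I _ m hbnd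
  refine ⟨hnd, hbnd, hlen, hsub, hlt, ?_⟩
  rw [pvPop_eq m _ hlt]
  have : (List.range m).filter (fun t => (pvLift I (2 ^ I.length - 1)).testBit t)
      = (List.range m).filter (fun x => decide (x ∈ I)) := by
    apply List.filter_congr
    intro t _
    have := pvMaskOf_testBit I t
    by_cases hc : t ∈ I
    · simp [hc, this.mpr hc]
    · simp only [decide_eq_false hc]
      cases hx : (pvLift I (2 ^ I.length - 1)).testBit t
      · rfl
      · exact absurd (this.mp hx) hc
  rw [this, pvFilter_eq_of_sublist hsub (List.nodup_range), hlen]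

theorem pvMask_surj (m s p : Nat) (hlt : p < 2 ^ m) (hpop : pvPop p = s) :
    ∃ I ∈ PySem.List.combinations (List.range m) s, pvLift I (2 ^ I.length - 1) = p := by
  refine ⟨(List.range m).filter (fun t => p.testBit t), ?_, ?_⟩
  · apply (PySem.List.mem_combinations_iff _ s _).mpr
    exact ⟨List.filter_sublist, by rw [← pvPop_eq m p hlt, hpop]⟩
  · apply Nat.eq_of_testBit_eq
    intro w
    have hiff := pvMaskOf_testBit ((List.range m).filter (fun t => p.testBit t)) w
    by_cases hw : p.testBit w = true
    · have hwm : w < m := by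
        by_contra hge
        rw [Nat.testBit_eq_false_of_lt (lt_of_lt_of_le hlt
          (Nat.pow_le_pow_right (by omega) (by omega)))] at hw
        exact Bool.false_ne_true hw
      rw [hw, hiff.mpr (by rw [List.mem_filter]; exact ⟨List.mem_range.mpr hwm, hw⟩)]
    · rw [Bool.eq_false_iff.mpr hw]
      cases hx : (pvLift _ (2 ^ _ - 1)).testBit w
      · rfl
      · have := hiff.mp hx
        rw [List.mem_filter] at this
        exact absurd this.2 hw

theorem pvPop_zero_iff : ∀ p : Nat, pvPop p = 0 ↔ p = 0 := by
  intro p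
  induction p using Nat.strong_induction_on with
  | _ p ih =>
    match p with
    | 0 => simp [pvPop]
    | q + 1 =>
      rw [pvPop]
      constructor
      · intro h
        exfalso
        have h2 : pvPop ((q + 1) / 2) = 0 := by omega
        have h3 := (ih ((q + 1) / 2) (by omega)).mp h2
        omega
      · intro h
        exact absurd h (by omega)

theorem pvPop_rest (m s : Nat) (I : List Nat) (hI : I ∈ PySem.List.combinations (List.range m) s)
    (v : Nat) (hv : v ∈ I) :
    pvPop (pvLift I (2 ^ I.length - 1) ^^^ 2 ^ v) = s - 1 := by
  obtain ⟨hnd, hbnd, hlen, hsub, hlt, hpop⟩ := pvMaskOf_facts m s I hI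
  have hrb : ∀ t, (pvLift I (2 ^ I.length - 1) ^^^ 2 ^ v).testBit t
      = decide (t ∈ I.erase v) := by
    intro t
    have hmem : (t ∈ I.erase v) ↔ (t ≠ v ∧ t ∈ I) := List.Nodup.mem_erase_iff hnd
    rw [Nat.testBit_xor, Nat.testBit_two_pow]
    by_cases htI : t ∈ I
    · rw [(pvMaskOf_testBit I t).mpr htI]
      by_cases htv : t = v
      · subst htv; simp [hmem]
      · simp [hmem, htv, htI, show ¬ v = t from fun h => htv h.symm]
    · have h1 : (pvLift I (2 ^ I.length - 1)).testBit t = false := by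
        cases hx : (pvLift I (2 ^ I.length - 1)).testBit t
        · rfl
        · exact absurd ((pvMaskOf_testBit I t).mp hx) htI
      have htv : ¬ v = t := fun h => htI (h ▸ hv)
      simp [hmem, h1, htv, htI]
  have hrlt : pvLift I (2 ^ I.length - 1) ^^^ 2 ^ v < 2 ^ m := by
    apply Nat.lt_pow_two_of_testBit
    intro w hw
    rw [hrb w]
    simp only [decide_eq_false_iff_not]
    intro hc
    have := hbnd w (((List.Nodup.mem_erase_iff hnd).mp hc).2)
    omega
  rw [pvPop_eq m _ hrlt]
  have : (List.range m).filter (fun t => (pvLift I (2 ^ I.length - 1) ^^^ 2 ^ v).testBit t)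
      = (List.range m).filter (fun t => decide (t ∈ I.erase v)) := by
    apply List.filter_congr
    intro t _
    rw [hrb t]
  rw [this, pvFilter_eq_of_sublist (List.Sublist.trans (List.erase_sublist) hsub) (List.nodup_range),
    List.length_erase_of_mem hv, hlen]

theorem PC_high_zero (T : List (List Int)) (jN : Nat) (others : List Nat) :
    ∀ p, (∃ w, others.length ≤ w ∧ p.testBit w = true) → ∀ q,
      PC T jN others p q = 0 := by
  intro p
  induction p using Nat.strong_induction_on with
  | _ p ih =>
    rintro ⟨w, hwm, hwb⟩ q
    rw [PC_eq]
    by_cases hb : q < others.length ∧ p.testBit q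
    · rw [if_pos hb]
      have hwq : w ≠ q := by omega
      have hrw : (p ^^^ 2 ^ q).testBit w = true := by
        rw [Nat.testBit_xor, hwb, Nat.testBit_two_pow]
        simp [Ne.symm hwq]
      have hz : p ^^^ 2 ^ q ≠ 0 := by
        intro h0
        rw [h0, Nat.zero_testBit] at hrw
        exact Bool.false_ne_true hrw
      rw [if_neg hz]
      have : ∀ u ∈ List.range others.length,
          (if (p ^^^ 2 ^ q).testBit u ∧ pvEnt T (others.getD u 0) (others.getD q 0) ≠ 0 then
            PC T jN others (p ^^^ 2 ^ q) u else 0) = 0 := by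
        intro u _
        rw [ih _ (pvBit_xor_lt hb.2) ⟨w, hwm, hrw⟩ u]
        exact ite_self 0
      rw [List.map_congr_left this]
      simp
    · rw [if_neg hb]

-- ---- B side: each layer of the combination-driven DP computes PC on its size ----

theorem pvMask_foldl (I : List Nat) :
    ∀ acc : Nat, I.foldl (fun mask t => mask ||| 2 ^ t) acc
      = acc ||| pvLift I (2 ^ I.length - 1) := by
  induction I with
  | nil => intro acc; simp [pvLift]
  | cons t I ih =>
    intro acc
    rw [List.foldl_cons, ih, pvLift]
    have h0 : (2 ^ (t :: I).length - 1).testBit 0 = true := by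
      rw [Nat.testBit_two_pow_sub_one]
      simp
    have hshift : (2 ^ (t :: I).length - 1) >>> 1 = 2 ^ I.length - 1 := by
      rw [Nat.shiftRight_one]
      have : 2 ^ (t :: I).length = 2 * 2 ^ I.length := by
        rw [List.length_cons, pow_succ]
        ring
      omega
    rw [if_pos h0, hshift, Nat.or_assoc]

theorem pvB_comb_fold (T : List (List Int)) (iN jN : Nat) (others : List Nat)
    (prev : Nat → Nat → Int) (mask s : Nat)
    (Hprev : ∀ p q, pvPop p = s - 1 → prev p q = PC T jN others p q) :
    ∀ (I : List Nat),
      (∀ v ∈ I, v < others.length ∧ mask.testBit v = true ∧ pvPop (mask ^^^ 2 ^ v) = s - 1) →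
      ∀ (cur : Nat → Nat → Int) (bs : Nat → Int),
        I.foldl (pvBStepV T iN jN others prev mask s) (cur, bs)
          = (fun p q => if p = mask ∧ q ∈ I then PC T jN others p q else cur p q,
             fun z => bs z + (if z = s then
               (I.map (fun v => if pvEnt T (others.getD v 0) iN ≠ 0 then
                 PC T jN others mask v else 0)).sum else 0)) := by
  intro I
  induction I with
  | nil =>
    intro _ cur bs
    refine Prod.ext ?_ ?_
    · funext p q; simp
    · funext z; simp
  | cons v I ih =>
    intro hmem cur bs
    obtain ⟨hv, hbit, hrest⟩ := hmem v (by simp)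
    have hval : pvBVal T jN others prev (mask ^^^ 2 ^ v) v = PC T jN others mask v :=
      pvBVal_eq T jN others prev mask v hv hbit (fun u => Hprev _ u hrest)
    rw [List.foldl_cons]
    have hstep : pvBStepV T iN jN others prev mask s (cur, bs) v =
        (pvUpd cur mask v (PC T jN others mask v),
         if PC T jN others mask v ≠ 0 ∧ pvEnt T (others.getD v 0) iN ≠ 0 then
           (fun z => if z = s then bs z + PC T jN others mask v else bs z) else bs) := by
      rw [pvBStepV]
      simp only [hval]
      split
      · rfl
      · rfl
    rw [hstep, ih (fun w hw => hmem w (by simp [hw])) _ _]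
    refine Prod.ext ?_ ?_
    · funext p q
      dsimp only
      by_cases h1 : p = mask ∧ q ∈ I
      · rw [if_pos h1, if_pos ⟨h1.1, by simp [h1.2]⟩]
      · rw [if_neg h1]
        by_cases h2 : p = mask ∧ q ∈ v :: I
        · have hqv : q = v := by
            rcases List.mem_cons.mp h2.2 with h | h
            · exact h
            · exact absurd ⟨h2.1, h⟩ h1
          rw [if_pos h2, pvUpd, if_pos ⟨h2.1, hqv⟩, h2.1, hqv]
        · rw [if_neg h2, pvUpd, if_neg ?_]
          rintro ⟨rfl, rfl⟩
          exact h2 ⟨rfl, by simp⟩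
    · funext z
      dsimp only
      by_cases hla : PC T jN others mask v ≠ 0 ∧ pvEnt T (others.getD v 0) iN ≠ 0
      · rw [if_pos hla]
        simp only [List.map_cons, List.sum_cons]
        rw [if_pos hla.2]
        by_cases hz : z = s
        · rw [if_pos hz, if_pos hz, if_pos hz]; ring
        · rw [if_neg hz, if_neg hz, if_neg hz]
      · rw [if_neg hla]
        simp only [List.map_cons, List.sum_cons]
        have hterm : (if pvEnt T (others.getD v 0) iN ≠ 0 then
            PC T jN others mask v else 0) = 0 := by
          by_cases hc : pvEnt T (others.getD v 0) iN ≠ 0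
          · rw [if_pos hc]
            by_contra hne
            exact hla ⟨hne, hc⟩
          · rw [if_neg hc]
        rw [hterm]
        by_cases hz : z = s
        · rw [if_pos hz, if_pos hz]; ring
        · rw [if_neg hz, if_neg hz]

-- total closed-path weight of layer s
def pvTot (T : List (List Int)) (iN jN : Nat) (others : List Nat) (s : Nat) : Int :=
  ((PySem.List.combinations (List.range others.length) s).map (fun I =>
    (I.map (fun v => if pvEnt T (others.getD v 0) iN ≠ 0 then
      PC T jN others (pvLift I (2 ^ I.length - 1)) v else 0)).sum)).sum

theorem pvB_pass_eq (T : List (List Int)) (iN jN : Nat) (others : List Nat) (s : Nat)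
    (hs : 1 ≤ s) (prev : Nat → Nat → Int) (bs : Nat → Int)
    (Hprev : ∀ p q, prev p q = if pvPop p = s - 1 then PC T jN others p q else 0) :
    pvBPass T iN jN others s (prev, bs)
      = (fun p q => if pvPop p = s then PC T jN others p q else 0,
         fun z => bs z + (if z = s then pvTot T iN jN others s else 0)) := by
  rw [pvBPass]
  have Hprev' : ∀ p q, pvPop p = s - 1 → prev p q = PC T jN others p q := by
    intro p q h
    rw [Hprev, if_pos h]
  have hgen : ∀ (cs : List (List Nat)),
      (∀ I ∈ cs, I ∈ PySem.List.combinations (List.range others.length) s) →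
      ∀ (cur : Nat → Nat → Int) (bs0 : Nat → Int),
        cs.foldl (fun st2 I =>
          I.foldl (pvBStepV T iN jN others prev (I.foldl (fun mask t => mask ||| 2 ^ t) 0) s)
            st2) (cur, bs0)
        = (fun p q => if p ∈ cs.map (fun I => pvLift I (2 ^ I.length - 1)) ∧
              p.testBit q = true then PC T jN others p q else cur p q,
           fun z => bs0 z + (if z = s then
             (cs.map (fun I => (I.map (fun v => if pvEnt T (others.getD v 0) iN ≠ 0 then
               PC T jN others (pvLift I (2 ^ I.length - 1)) v else 0)).sum)).sum else 0)) := by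
    intro cs
    induction cs with
    | nil =>
      intro _ cur bs0
      refine Prod.ext ?_ ?_
      · funext p q; simp
      · funext z; simp
    | cons I cs ih =>
      intro hcs cur bs0
      obtain ⟨hnd, hbnd, hlen, hsub, hlt, hpop⟩ :=
        pvMaskOf_facts others.length s I (hcs I (by simp))
      rw [List.foldl_cons, pvMask_foldl I 0, Nat.zero_or]
      rw [pvB_comb_fold T iN jN others prev (pvLift I (2 ^ I.length - 1)) s Hprev' I
        (fun v hv => ⟨hbnd v hv, (pvMaskOf_testBit I v).mpr hv,
          pvPop_rest others.length s I (hcs I (by simp)) v hv⟩) cur bs0]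
      rw [ih (fun J hJ => hcs J (by simp [hJ])) _ _]
      refine Prod.ext ?_ ?_
      · funext p q
        dsimp only
        by_cases h1 : p ∈ cs.map (fun I => pvLift I (2 ^ I.length - 1)) ∧ p.testBit q = true
        · rw [if_pos h1, if_pos ⟨by simp only [List.map_cons, List.mem_cons]; right; exact h1.1,
            h1.2⟩]
        · rw [if_neg h1]
          by_cases h2 : p ∈ (I :: cs).map (fun I => pvLift I (2 ^ I.length - 1)) ∧
              p.testBit q = true
          · have hpI : p = pvLift I (2 ^ I.length - 1) := by
              rcases (by simpa using h2.1 : p = pvLift I (2 ^ I.length - 1) ∨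
                  ∃ a ∈ cs, pvLift a (2 ^ a.length - 1) = p) with h | h
              · exact h
              · obtain ⟨a, ha, hap⟩ := h
                exact absurd ⟨List.mem_map.mpr ⟨a, ha, hap⟩, h2.2⟩ h1
            rw [if_pos h2, if_pos ⟨hpI, by
              rw [hpI] at h2
              exact (pvMaskOf_testBit I q).mp h2.2⟩]
          · rw [if_neg h2, if_neg ?_]
            rintro ⟨rfl, hq⟩
            exact h2 ⟨by simp, (pvMaskOf_testBit I q).mpr hq⟩
      · funext z
        dsimp only
        simp only [List.map_cons, List.sum_cons]
        by_cases hz : z = s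
        · rw [if_pos hz, if_pos hz, if_pos hz]; ring
        · rw [if_neg hz, if_neg hz, if_neg hz]; ring
  rw [hgen _ (fun I hI => hI) _ _]
  rw [pvTot]
  refine Prod.ext ?_ ?_
  · funext p q
    dsimp only
    by_cases h1 : p ∈ (PySem.List.combinations (List.range others.length) s).map
        (fun I => pvLift I (2 ^ I.length - 1))
    · obtain ⟨I, hI, rfl⟩ := List.mem_map.mp h1
      obtain ⟨hnd, hbnd, hlen, hsub, hlt, hpop⟩ := pvMaskOf_facts others.length s I hI
      rw [if_pos hpop]
      by_cases hq : (pvLift I (2 ^ I.length - 1)).testBit q = true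
      · rw [if_pos ⟨h1, hq⟩]
      · rw [if_neg (by rintro ⟨_, hc⟩; exact hq hc)]
        rw [PC_out _ _ _ _ _ (by rintro ⟨_, hc⟩; exact hq hc)]
    · rw [if_neg (by rintro ⟨hc, _⟩; exact h1 hc)]
      by_cases hpop : pvPop p = s
      · rw [if_pos hpop]
        by_cases hlt : p < 2 ^ others.length
        · obtain ⟨I, hI, hmask⟩ := pvMask_surj others.length s p hlt hpop
          exact absurd (List.mem_map.mpr ⟨I, hI, hmask⟩) h1
        · refine Eq.symm (PC_high_zero T jN others p ?_ q)
          by_contra hall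
          push_neg at hall
          apply hlt
          apply Nat.lt_pow_two_of_testBit
          intro w hw
          cases hx : p.testBit w
          · rfl
          · exact absurd hx (by simpa using hall w hw)
      · rw [if_neg hpop]
  · funext z
    rfl

theorem pvBDp_eq (T : List (List Int)) (iN jN : Nat) (others : List Nat) :
    ∀ K : Nat, pvBDp T iN jN others K
      = (fun p q => if pvPop p = K then PC T jN others p q else 0,
         fun z => if 1 ≤ z ∧ z ≤ K then pvTot T iN jN others z else 0) := by
  intro K
  rw [pvBDp]
  induction K with
  | zero =>
    rw [List.range'_zero, List.foldl_nil]
    refine Prod.ext ?_ ?_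
    · funext p q
      dsimp only
      by_cases hp : pvPop p = 0
      · rw [if_pos hp]
        have : p = 0 := (pvPop_zero_iff p).mp hp
        subst this
        refine Eq.symm (PC_out _ _ _ _ _ ?_)
        rintro ⟨_, htb⟩
        rw [Nat.zero_testBit] at htb
        exact Bool.false_ne_true htb
      · rw [if_neg hp]
    · funext z
      dsimp only
      rw [if_neg (by omega)]
  | succ K ih =>
    rw [List.range'_1_concat, List.foldl_append, List.foldl_cons, List.foldl_nil, ih,
      show 1 + K = K + 1 from by omega]
    rw [pvB_pass_eq T iN jN others (K + 1) (by omega) _ _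
      (fun p q => by rw [show K + 1 - 1 = K from by omega])]
    refine Prod.ext ?_ ?_
    · rfl
    · funext z
      dsimp only
      by_cases hz : z = K + 1
      · rw [if_pos hz, if_neg (by omega), if_pos (by omega), zero_add, hz]
      · rw [if_neg hz]
        by_cases hz2 : 1 ≤ z ∧ z ≤ K
        · rw [if_pos hz2, if_pos (by omega)]; ring
        · rw [if_neg hz2, if_neg (by omega)]; ring

-- ---- per-length totals agree, hence the outputs agree ----

theorem pvOthers_self (others : List Nat) :
    others = (List.range others.length).map (fun t => others.getD t 0) := by
  apply List.ext_getElem (by simp)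
  intro i h1 h2
  simp only [List.getElem_map, List.getElem_range]
  rw [List.getD_eq_getElem others 0 h1]

theorem pvMap_getD_sum (I : List Nat) (f : Nat → Int) :
    (I.map f).sum = ((List.range I.length).map (fun v => f (I.getD v 0))).sum := by
  conv_lhs => rw [pvOthers_self I]
  rw [List.map_map]
  rfl

theorem pvACount_lift (T : List (List Int)) (iN jN : Nat) (others : List Nat)
    (I : List Nat) (hndI : I.Nodup) (hbnd : ∀ x ∈ I, x < others.length) :
    pvACount T iN jN (I.map (fun t => others.getD t 0))
      = (I.map (fun v => if pvEnt T (others.getD v 0) iN ≠ 0 then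
          PC T jN others (pvLift I (2 ^ I.length - 1)) v else 0)).sum := by
  have hgd : ∀ t, t < I.length →
      (I.map (fun t => others.getD t 0)).getD t 0 = others.getD (I.getD t 0) 0 := by
    intro t ht
    rw [List.getD_eq_getElem _ 0 (by rw [List.length_map]; omega), List.getElem_map,
      List.getD_eq_getElem I 0 ht]
  rw [pvACount_eq]
  simp only [List.length_map]
  rw [pvMap_getD_sum I]
  have hmsk : 2 ^ I.length - 1 < 2 ^ I.length := by
    have : 0 < 2 ^ I.length := by positivity
    omega
  apply congrArg List.sum
  apply List.map_congr_left
  intro v hv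
  have hvl : v < I.length := List.mem_range.mp hv
  rw [hgd v hvl, pvPC_lift T jN others I hndI hbnd _ hmsk v hvl]

theorem pvCount_sum (T : List (List Int)) (iN jN : Nat) (others : List Nat) (k : Nat) :
    (PySem.List.combinations others k).foldl (fun c extra => c + pvACount T iN jN extra) 0
      = pvTot T iN jN others k := by
  rw [PySem.List.foldl_add, zero_add]
  have hcomb : PySem.List.combinations others k
      = (PySem.List.combinations (List.range others.length) k).map
        (List.map (fun t => others.getD t 0)) := by
    conv_lhs => rw [pvOthers_self others]
    exact PySem.List.combinations_map _ _ k
  rw [hcomb, List.map_map, pvTot]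
  apply congrArg List.sum
  apply List.map_congr_left
  intro I hI
  obtain ⟨hsub, hlen⟩ := (PySem.List.mem_combinations_iff _ k I).mp hI
  exact pvACount_lift T iN jN others I (hsub.nodup (List.nodup_range))
    (fun x hx => List.mem_range.mp (hsub.mem hx))

theorem pvBLs_subset (mI : Int) : ∀ ls : List Int, ∀ L ∈ pvBLs mI ls, L ∈ ls := by
  intro ls
  induction ls with
  | nil => intro L h; exact absurd h (by simp [pvBLs])
  | cons L0 rest ih =>
    intro L h
    rw [pvBLs] at h
    by_cases hbr : L0 - 2 > mI
    · rw [if_pos hbr] at h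
      exact absurd h (by simp)
    · rw [if_neg hbr] at h
      rcases List.mem_cons.mp h with h | h
      · simp [h]
      · exact List.mem_cons.mpr (Or.inr (ih L h))

theorem pvALoop_eq_map (T : List (List Int)) (iN jN : Nat) (others : List Nat) :
    ∀ ls : List Int,
      pvALoop T iN jN others ls = (pvBLs (others.length : Int) ls).map (fun L =>
        (L, (PySem.List.combinations others (L - 2).toNat).foldl
          (fun c extra => c + pvACount T iN jN extra) 0)) := by
  intro ls
  induction ls with
  | nil => rfl
  | cons L rest ih =>
    rw [pvALoop, pvBLs]
    by_cases hbr : L - 2 > (others.length : Int)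
    · rw [if_pos hbr, if_pos hbr]
      rfl
    · rw [if_neg hbr, if_neg hbr, List.map_cons, ih]

-- ===== VERDICT (by name: the statement is the Claim_ definition above) =====
theorem count_cycles_using_arc_by_length_spec : Claim_equal_count_cycles_using_arc_by_length := by
  intro T n i j min_length _ hpre
  unfold Spec_count_cycles_using_arc_by_length
  unfold count_cycles_using_arc_by_length count_cycles_using_arc_by_length_alt
  dsimp only
  rcases hpre with hgt | ⟨hn0, hTlen, hrows, hi0, hin, hj0, hjn, hml⟩
  · have hempty : PySem.List.pyRange min_length (n + 1) 2 = [] := by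
      apply List.eq_nil_iff_forall_not_mem.mpr
      intro x hx
      obtain ⟨h1, h2, _⟩ := (PySem.List.mem_pyRange_iff_of_pos (by omega) x).mp hx
      omega
    rw [hempty]
    rfl
  · set others : List Nat := (List.range n.toNat).filter
      (fun u => decide ((u : Int) ≠ i) && decide ((u : Int) ≠ j)) with hothers
    set Ls : List Int := pvBLs ((others.length : Int))
      (PySem.List.pyRange min_length (n + 1) 2) with hLsdef
    set kmax : Int := Ls.foldl (fun k L => max k (L - 2)) 0 with hkmax
    rw [pvALoop_eq_map]
    rw [← hLsdef]
    apply List.map_congr_left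
    intro L hL
    have hLr : L ∈ PySem.List.pyRange min_length (n + 1) 2 := pvBLs_subset _ _ L hL
    have hL2 : (2 : Int) ≤ L := by
      obtain ⟨h1, _, _⟩ := (PySem.List.mem_pyRange_iff_of_pos (by omega) L).mp hLr
      omega
    have hLk : L - 2 ≤ kmax := by
      rw [hkmax]
      exact (PySem.List.le_foldl_max_int Ls (fun L => L - 2) 0).2 L hL
    have hk0 : (0 : Int) ≤ kmax := by
      rw [hkmax]
      exact (PySem.List.le_foldl_max_int Ls (fun L => L - 2) 0).1
    refine Prod.ext rfl ?_
    dsimp only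
    by_cases hL3 : L - 2 > 0
    · rw [if_pos hL3, pvBDp_eq]
      dsimp only
      rw [if_pos (by omega)]
      exact pvCount_sum T i.toNat j.toNat others (L - 2).toNat
    · rw [if_neg hL3]
      have h0 : (L - 2).toNat = 0 := by omega
      rw [h0, PySem.List.combinations_zero, List.foldl_cons, List.foldl_nil]
      have : pvACount T i.toNat j.toNat [] = 0 := rfl
      rw [this]
      omega
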